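-- pv_equiv track=rewrite | github.com/wyk18703232953/myResearch | codeComplex/data/filteredData/python/nlogn/python_nlogn_0639.py | core_algorithm
-- ===== SOURCE A (Python) =====
-- def next_index(k, a, x):
--     while k < len(a) and a[k] < x:
--         k += 1
--     return k
--
-- def core_algorithm(n, m, vert, horz_all):
--     horz = []
--     for x1, x2, y in horz_all:
--         if x1 == 1:
--             horz.append(x2)
--
--     vert.sort()
--     horz.sort()
--
--     vert.append(1000000000)
--
--     num = next_index(0, horz, vert[0])
--
--     ans = len(horz) - num
--
--     for i in range(1, len(vert)):
--         num2 = next_index(num, horz, vert[i])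
--         t = i + len(horz) - num2
--         if t < ans:
--             ans = t
--         num = num2
--
--     return ans
-- ===== SOURCE B (Python) =====
-- def core_algorithm(n, m, vert, horz_all):
--     # Return-value equivalence only: A sorts vert in place and appends a sentinel; B leaves vert untouched.
--     horz = sorted(x2 for x1, x2, y in horz_all if x1 == 1)
--     h = len(horz)
--     vs = sorted(vert) + [1000000000]
--     best = None
--     for i, v in enumerate(vs):
--         lo, hi = 0, h
--         while lo < hi:
--             mid = (lo + hi) // 2
--             if horz[mid] < v:
--                 lo = mid + 1
--             else:
--                 hi = mid
--         t = i + h - lo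
--         if best is None or t < best:
--             best = t
--     return best
-- ===== Notes on version B (the rewrite author's own statement) =====
-- stated objective: alternative
-- what changed: The stateful two-pointer merge (next_index resuming from the previous position while scanning the sorted horz list) is replaced by an independent hand-written binary search over horz for each enumerated value, with a running minimum over i + len(horz) - bisect_left; B also does not mutate vert (A sorts it in place and appends the 1000000000 sentinel).
import Mathlib
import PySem

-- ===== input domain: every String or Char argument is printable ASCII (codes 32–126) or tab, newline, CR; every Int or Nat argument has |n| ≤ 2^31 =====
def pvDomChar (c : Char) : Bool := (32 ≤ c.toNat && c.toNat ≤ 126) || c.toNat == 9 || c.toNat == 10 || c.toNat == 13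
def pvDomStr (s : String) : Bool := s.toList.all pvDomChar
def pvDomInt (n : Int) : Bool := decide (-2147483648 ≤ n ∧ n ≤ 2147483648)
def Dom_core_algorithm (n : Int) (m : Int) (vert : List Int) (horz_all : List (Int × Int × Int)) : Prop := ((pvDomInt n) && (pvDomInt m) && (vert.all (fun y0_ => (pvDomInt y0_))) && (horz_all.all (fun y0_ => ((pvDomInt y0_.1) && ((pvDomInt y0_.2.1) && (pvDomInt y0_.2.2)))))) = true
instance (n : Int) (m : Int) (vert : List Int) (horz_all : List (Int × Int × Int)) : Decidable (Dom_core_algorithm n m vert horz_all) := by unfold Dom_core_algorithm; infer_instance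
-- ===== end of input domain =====

-- B replaces A's stateful two-pointer merge by an independent hand-written binary search per
-- element with a running minimum (objective: alternative; return-value equivalence only —
-- A sorts vert in place and appends a sentinel to it, B does not mutate vert).

-- ===== PORT A =====
-- while k < len(a) and a[k] < x: k += 1
def nextIndex (a : List Int) (x : Int) (k : Nat) : Nat :=
  if h : k < a.length ∧ a.getD k 0 < x then nextIndex a x (k + 1) else k
termination_by a.length - k
decreasing_by omega

def core_algorithm (n : Int) (m : Int) (vert : List Int) (horz_all : List (Int × Int × Int)) : Int :=
  let horz := horz_all.foldl (fun acc t => if t.1 == 1 then acc ++ [t.2.1] else acc) ([] : List Int)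
  let vertS := PySem.List.sorted vert (fun x => x) false
  let horzS := PySem.List.sorted horz (fun x => x) false
  let vert2 := vertS ++ [1000000000]
  let num := nextIndex horzS (PySem.List.pyGetD vert2 0 0) 0
  let ans : Int := (horzS.length : Int) - (num : Int)
  let st := (PySem.List.pyRange 1 (vert2.length : Int) 1).foldl
    (fun (st : Nat × Int) i =>
      let num2 := nextIndex horzS (PySem.List.pyGetD vert2 i 0) st.1
      let t : Int := i + (horzS.length : Int) - (num2 : Int)
      (num2, if t < st.2 then t else st.2)) (num, ans)
  st.2

-- ===== PORT B =====
-- hand-written bisect-left loop of Source B: lo, hi = 0, h; while lo < hi: …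
def bisectSearch (a : List Int) (v : Int) (lo hi : Nat) : Nat :=
  if _h : lo < hi then
    let mid := (lo + hi) / 2
    if a.getD mid 0 < v then bisectSearch a v (mid + 1) hi else bisectSearch a v lo mid
  else lo
termination_by hi - lo
decreasing_by all_goals omega

def core_algorithm_alt (n : Int) (m : Int) (vert : List Int) (horz_all : List (Int × Int × Int)) : Int :=
  let horz := PySem.List.sorted ((horz_all.filter (fun t => t.1 == 1)).map (fun t => t.2.1)) (fun x => x) false
  let vs := PySem.List.sorted vert (fun x => x) false ++ [1000000000]
  let best := (PySem.List.enumerate vs 0).foldl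
    (fun (best : Option Int) p =>
      let t : Int := p.1 + (horz.length : Int) - (bisectSearch horz p.2 0 horz.length : Int)
      match best with
      | none => some t
      | some b => if t < b then some t else some b) none
  best.getD 0

-- ===== PRECONDITION & SPEC =====
def Spec_core_algorithm (n : Int) (m : Int) (vert : List Int) (horz_all : List (Int × Int × Int)) (out : Int) : Prop := out = core_algorithm_alt n m vert horz_all
instance (n : Int) (m : Int) (vert : List Int) (horz_all : List (Int × Int × Int)) (out : Int) : Decidable (Spec_core_algorithm n m vert horz_all out) := by unfold Spec_core_algorithm; infer_instance

-- ===== CLAIM (what is proved, stated in full; the proofs are below) =====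
def Claim_equal_core_algorithm : Prop := ∀ (n : Int) (m : Int) (vert : List Int) (horz_all : List (Int × Int × Int)), Dom_core_algorithm n m vert horz_all → Spec_core_algorithm n m vert horz_all (core_algorithm n m vert horz_all)

-- ===== LEMMAS AND PROOFS =====

/-- number of elements of `a` below `v` — what both the two-pointer and the binary search compute -/
def cntLt (a : List Int) (v : Int) : Nat := a.countP (fun x => decide (x < v))

lemma cntLt_le (a : List Int) (v : Int) : cntLt a v ≤ a.length := List.countP_le_length ..

lemma cntLt_lt_iff (a : List Int) (ha : a.Pairwise (· ≤ ·)) (v : Int) (j : Nat)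
    (hj : j < a.length) : (a.getD j 0 < v ↔ j < cntLt a v) := by
  induction a generalizing j with
  | nil => simp at hj
  | cons x t ih =>
    rw [List.pairwise_cons] at ha
    obtain ⟨hx, ht⟩ := ha
    by_cases hxv : x < v
    · have hc : cntLt (x :: t) v = cntLt t v + 1 := by
        simp [cntLt, hxv]
      cases j with
      | zero => simp [hc, hxv]
      | succ j =>
        simp only [List.getD_cons_succ, hc]
        rw [ih ht j (by simpa using hj)]
        omega
    · have hc : cntLt (x :: t) v = 0 := by
        simp only [cntLt, List.countP_eq_zero]
        intro y hy
        rcases List.mem_cons.mp hy with rfl | hy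
        · simpa using hxv
        · simp only [decide_eq_true_eq]
          intro hlt
          exact hxv (lt_of_le_of_lt (hx y hy) hlt)
      rw [hc]
      cases j with
      | zero => simpa using hxv
      | succ j =>
        simp only [List.getD_cons_succ]
        have hj' : j < t.length := by simpa using hj
        have : x ≤ t.getD j 0 := by
          rw [List.getD_eq_getElem t 0 hj']
          exact hx _ (t.get_mem ⟨j, hj'⟩)
        constructor
        · intro h; exact absurd (lt_of_le_of_lt this h) hxv
        · omega
lemma nextIndex_eq (a : List Int) (ha : a.Pairwise (· ≤ ·)) (v : Int) (k : Nat) :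
    nextIndex a v k = max k (cntLt a v) := by
  fun_induction nextIndex a v k with
  | case1 k h ih =>
    have hk : k < cntLt a v := (cntLt_lt_iff a ha v k h.1).mp h.2
    rw [ih]; omega
  | case2 k h =>
    rw [Decidable.not_and_iff_not_or_not] at h
    rcases h with h | h
    · have := cntLt_le a v; omega
    · by_cases hk : k < a.length
      · have := (cntLt_lt_iff a ha v k hk).not.mp h; omega
      · have := cntLt_le a v; omega
lemma bisect_eq (a : List Int) (ha : a.Pairwise (· ≤ ·)) (v : Int) (lo hi : Nat) :
    hi ≤ a.length → lo ≤ cntLt a v → cntLt a v ≤ hi → bisectSearch a v lo hi = cntLt a v := by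
  fun_induction bisectSearch a v lo hi with
  | case1 lo hi hlt mid hmid ih =>
    intro hhi hlo hc
    have hmlen : mid < a.length := by simp only [mid] at *; omega
    have := (cntLt_lt_iff a ha v mid hmlen).mp hmid
    exact ih hhi (by omega) hc
  | case2 lo hi hlt mid hmid ih =>
    intro hhi hlo hc
    have hmlen : mid < a.length := by simp only [mid] at *; omega
    have := (cntLt_lt_iff a ha v mid hmlen).not.mp hmid
    exact ih (by omega) hlo (by omega)
  | case3 lo hi hlt =>
    intro hhi hlo hc; omega
lemma foldl_pyRange_enum {σ : Type} (v0 : Int) (rest : List Int) (F : σ → Int × Int → σ) (init : σ) :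
    List.foldl (fun st i => F st (i, PySem.List.pyGetD (v0 :: rest) i 0)) init
      (PySem.List.pyRange 1 ((v0 :: rest).length : Int))
    = List.foldl F init (PySem.List.enumerate rest 1) := by
  have henum := PySem.List.enumerate_eq_map_pyRange (v0 :: rest) 0
  rw [PySem.List.len_eq, PySem.List.pyRange_one_cons (by exact_mod_cast Nat.succ_pos rest.length), List.map_cons,
      PySem.List.enumerate_cons] at henum
  have htail : (PySem.List.pyRange 1 ((v0 :: rest).length : Int)).map
      (fun j => (j, PySem.List.pyGetD (v0 :: rest) j 0)) = PySem.List.enumerate rest 1 := by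
    have := (List.cons.injEq _ _ _ _).mp henum
    norm_num at this ⊢
    exact this.symm
  have hfm := List.foldl_map (f := fun j => (j, PySem.List.pyGetD (v0 :: rest) j 0)) (g := F)
    (l := PySem.List.pyRange 1 ((v0 :: rest).length : Int)) (init := init)
  exact hfm.symm.trans (by rw [htail])

lemma loop_eq (H : List Int) (hH : H.Pairwise (· ≤ ·)) (tl : List Int) :
    ∀ (s : Int) (num : Nat) (ans : Int), num ≤ H.length →
      ans ≤ s - 1 + (H.length : Int) - (num : Int) →
    ((PySem.List.enumerate tl s).foldl
      (fun (best : Option Int) p =>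
        let t : Int := p.1 + (H.length : Int) - (bisectSearch H p.2 0 H.length : Int)
        match best with
        | none => some t
        | some b => if t < b then some t else some b) (some ans))
    = some (((PySem.List.enumerate tl s).foldl
      (fun (st : Nat × Int) i =>
        let num2 := nextIndex H i.2 st.1
        let t : Int := i.1 + (H.length : Int) - (num2 : Int)
        (num2, if t < st.2 then t else st.2)) (num, ans)).2) := by
  induction tl with
  | nil => intro s num ans _ _; simp [PySem.List.enumerate_nil]
  | cons v tl ih =>
    intro s num ans hnum hinv
    rw [PySem.List.enumerate_cons, List.foldl_cons, List.foldl_cons]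
    have hbs : bisectSearch H v 0 H.length = cntLt H v :=
      bisect_eq H hH v 0 H.length le_rfl (Nat.zero_le _) (cntLt_le H v)
    have hni : nextIndex H v num = max num (cntLt H v) := nextIndex_eq H hH v num
    simp only [hbs, hni]
    by_cases hc : num ≤ cntLt H v
    · have hmax : max num (cntLt H v) = cntLt H v := by omega
      rw [hmax]
      have hcle := cntLt_le H v
      by_cases hlt : s + (H.length : Int) - (cntLt H v : Int) < ans
      · simp only [if_pos hlt]
        exact ih (s+1) (cntLt H v) _ hcle (by omega)
      · simp only [if_neg hlt]
        exact ih (s+1) (cntLt H v) _ hcle (by omega)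
    · have hmax : max num (cntLt H v) = num := by omega
      rw [hmax]
      have h1 : ¬ (s + (H.length : Int) - (num : Int) < ans) := by omega
      have h2 : ¬ (s + (H.length : Int) - (cntLt H v : Int) < ans) := by
        have : (cntLt H v : Int) < (num : Int) := by exact_mod_cast Nat.lt_of_not_le hc
        omega
      simp only [if_neg h1, if_neg h2]
      exact ih (s+1) num ans hnum (by omega)
-- ===== VERDICT (by name: the statement is the Claim_ definition above) =====
theorem core_algorithm_spec : Claim_equal_core_algorithm := by
  intro n m vert horz_all _
  unfold Spec_core_algorithm
  unfold core_algorithm core_algorithm_alt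
  rw [PySem.List.foldl_append_if (fun t => t.1 == 1) (fun t => t.2.1) horz_all []]
  simp only [List.nil_append]
  set H := PySem.List.sorted ((horz_all.filter fun t => t.1 == 1).map fun t => t.2.1) (fun x => x) false with hHdef
  have hH : H.Pairwise (· ≤ ·) := PySem.List.sorted_pairwise _ _
  set vertS := PySem.List.sorted vert (fun x => x) false with hVdef
  obtain ⟨v0, rest, hL⟩ : ∃ v0 rest, vertS ++ [(1000000000 : Int)] = v0 :: rest := by
    cases vertS <;> exact ⟨_, _, rfl⟩
  rw [hL]
  have hbs0 : bisectSearch H v0 0 H.length = cntLt H v0 :=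
    bisect_eq H hH v0 0 H.length le_rfl (Nat.zero_le _) (cntLt_le H v0)
  rw [PySem.List.pyGetD_zero_cons, nextIndex_eq H hH v0 0, Nat.zero_max]
  have hA := foldl_pyRange_enum (σ := Nat × Int) v0 rest
    (fun st p => (nextIndex H p.2 st.1,
      if p.1 + (H.length : Int) - (nextIndex H p.2 st.1 : Int) < st.2 then
        p.1 + (H.length : Int) - (nextIndex H p.2 st.1 : Int) else st.2))
    (cntLt H v0, (H.length : Int) - (cntLt H v0 : Int))
  rw [hA, PySem.List.enumerate_cons, List.foldl_cons]
  norm_num [hbs0]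
  rw [loop_eq H hH rest 1 (cntLt H v0) ((H.length : Int) - (cntLt H v0 : Int))
    (cntLt_le H v0) (by omega)]
  simp
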